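-- pv_equiv track=rewrite | github.com/houseepoch/screenwire-cleanup | graph/cc_parser.py | _extract_staging_blocks
-- ===== SOURCE A (Python) =====
-- def _extract_staging_blocks(text: str) -> list[str]:
--     """Collect full ///SCENE_STAGING blocks including multiline | continuations.
--
--     The CC may format staging on one long line or across several lines
--     where each beat starts with '| beat: ...'. Both forms are collapsed
--     into a single string per block.
--     """
--     blocks: list[str] = []
--     lines = text.splitlines()
--     i = 0
--     while i < len(lines):
--         line = lines[i]
--         stripped = line.strip()
--         if stripped.startswith('///SCENE_STAGING:'):
--             first_content = stripped[len('///SCENE_STAGING:'):].strip()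
--             parts = [first_content]
--             i += 1
--             while i < len(lines):
--                 nxt = lines[i].strip()
--                 if not nxt:
--                     i += 1
--                     continue
--                 if nxt.startswith('|') and not nxt.startswith('///'):
--                     # Strip the leading '|' from continuation lines
--                     parts.append(nxt[1:].strip())
--                     i += 1
--                 else:
--                     break
--             blocks.append(' | '.join(parts))
--         else:
--             i += 1
--     return blocks
-- ===== SOURCE B (Python) =====
-- def _extract_staging_blocks(text: str) -> list[str]:
--     """Staged pipeline: strip and drop blank lines first (they are transparent to
--     block structure), then one right-to-left pass builds blocks back-to-front:
--     continuation parts accumulate in `pending` and are attached when their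
--     header is reached; any other line orphans them."""
--     HEADER = '///SCENE_STAGING:'
--     clean = [s for s in (l.strip() for l in text.splitlines()) if s]
--     blocks: list[str] = []   # built back-to-front, reversed at the end
--     pending: list[str] = []  # continuation parts seen below, in reverse order
--     for s in reversed(clean):
--         if s.startswith('|') and not s.startswith('///'):
--             pending.append(s[1:].strip())
--         elif s.startswith(HEADER):
--             blocks.append(' | '.join([s[len(HEADER):].strip()] + pending[::-1]))
--             pending = []
--         else:
--             pending = []
--     blocks.reverse()
--     return blocks
-- ===== Notes on version B (the rewrite author's own statement) =====
-- stated objective: alternative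
-- what changed: Replaced the nested index-based while loops with a staged pipeline: blank lines are stripped/filtered out up front (they are transparent to block structure), then a single right-to-left pass builds the blocks back-to-front, attaching a pending-continuations accumulator to each header it meets instead of scanning forward for continuations.
import Mathlib
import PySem

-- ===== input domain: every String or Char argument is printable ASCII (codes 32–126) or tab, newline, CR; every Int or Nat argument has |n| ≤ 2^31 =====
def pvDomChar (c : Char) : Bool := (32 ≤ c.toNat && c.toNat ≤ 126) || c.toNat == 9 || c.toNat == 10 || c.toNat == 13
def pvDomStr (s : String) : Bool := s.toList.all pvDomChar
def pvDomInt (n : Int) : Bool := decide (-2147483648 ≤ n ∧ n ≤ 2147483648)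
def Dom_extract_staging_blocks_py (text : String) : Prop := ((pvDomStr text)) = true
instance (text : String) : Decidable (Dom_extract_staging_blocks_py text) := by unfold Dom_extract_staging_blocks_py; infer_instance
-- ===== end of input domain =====

-- B replaces A's nested forward index scans by a staged pipeline: blank lines are
-- filtered out first, then a single right-to-left pass builds the blocks
-- back-to-front with a pending-continuations accumulator (objective: alternative).

-- ===== PORT A =====
-- inner while: consume blank and '|'-continuation lines, return (collected parts, remaining lines)
def pvInnerA : List String → List String × List String
  | [] => ([], [])
  | l :: ls =>
    let nxt := PySem.Str.strip l
    if nxt = "" then pvInnerA ls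
    else if PySem.Str.startswith nxt "|" && !(PySem.Str.startswith nxt "///") then
      let r := pvInnerA ls
      (PySem.Str.strip (PySem.Str.slice nxt (some 1) none) :: r.1, r.2)
    else ([], l :: ls)

-- termination fact for the outer while (the remainder is no longer than the input)
theorem pvInnerA_len_le (ls : List String) : (pvInnerA ls).2.length ≤ ls.length := by
  induction ls with
  | nil => simp [pvInnerA]
  | cons l ls ih =>
    simp only [pvInnerA]
    split_ifs <;> simp <;> omega

-- outer while over the lines
def pvOuterA : List String → List String
  | [] => []
  | l :: ls =>
    let stripped := PySem.Str.strip l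
    if PySem.Str.startswith stripped "///SCENE_STAGING:" then
      let first := PySem.Str.strip (PySem.Str.slice stripped (some 17) none)
      let r := pvInnerA ls
      PySem.Str.join " | " (first :: r.1) :: pvOuterA r.2
    else pvOuterA ls
termination_by ls => ls.length
decreasing_by
  · exact Nat.lt_succ_of_le (pvInnerA_len_le ls)
  · simp

def extract_staging_blocks_py (text : String) : List String :=
  pvOuterA (PySem.Str.splitlines text)

-- ===== PORT B =====
-- loop body of Source B's single right-to-left pass; state = (blocks reversed, pending parts reversed)
def pvStepB (st : List String × List String) (s : String) : List String × List String :=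
  if PySem.Str.startswith s "|" && !(PySem.Str.startswith s "///") then
    (st.1, st.2 ++ [PySem.Str.strip (PySem.Str.slice s (some 1) none)])
  else if PySem.Str.startswith s "///SCENE_STAGING:" then
    (st.1 ++ [PySem.Str.join " | " (PySem.Str.strip (PySem.Str.slice s (some 17) none) :: st.2.reverse)], [])
  else (st.1, [])

def extract_staging_blocks_py_alt (text : String) : List String :=
  let clean := ((PySem.Str.splitlines text).map PySem.Str.strip).filter (fun s => s ≠ "")
  let st := clean.reverse.foldl pvStepB ([], [])
  st.1.reverse

-- ===== PRECONDITION & SPEC =====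
def Spec_extract_staging_blocks_py (text : String) (out : List String) : Prop := out = extract_staging_blocks_py_alt text
instance (text : String) (out : List String) : Decidable (Spec_extract_staging_blocks_py text out) := by unfold Spec_extract_staging_blocks_py; infer_instance

-- ===== CLAIM =====
def Claim_equal_extract_staging_blocks_py : Prop := ∀ (text : String), Dom_extract_staging_blocks_py text → Spec_extract_staging_blocks_py text (extract_staging_blocks_py text)

-- ===== LEMMAS AND PROOFS =====

-- classification of a (stripped, non-blank) line
def pvCont (s : String) : Bool := PySem.Str.startswith s "|" && !(PySem.Str.startswith s "///")
def pvHdr (s : String) : Bool := PySem.Str.startswith s "///SCENE_STAGING:"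
def pvContC (s : String) : String := PySem.Str.strip (PySem.Str.slice s (some 1) none)
def pvHdrC (s : String) : String := PySem.Str.strip (PySem.Str.slice s (some 17) none)
def pvClean (ls : List String) : List String := (ls.map PySem.Str.strip).filter (fun s => s ≠ "")

-- common functional specification on the cleaned lines
def pvSpec : List String → List String
  | [] => []
  | s :: ls =>
    if pvHdr s then
      PySem.Str.join " | " (pvHdrC s :: (ls.takeWhile pvCont).map pvContC) :: pvSpec (ls.dropWhile pvCont)
    else pvSpec ls
termination_by ls => ls.length
decreasing_by
  · exact Nat.lt_succ_of_le (List.length_dropWhile_le _ _)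
  · simp

theorem pvHdr_not_cont {s : String} (h : pvHdr s = true) : pvCont s = false := by
  have hpre : PySem.Str.startswith s "///" = true := by
    have h1 : ("///".toList) <+: ("///SCENE_STAGING:".toList) := by decide
    have h2 : ("///SCENE_STAGING:".toList) <+: s.toList := by
      have := h; simp only [pvHdr, PySem.Str.startswith_eq, PySem.Chars.startswith_iff] at this
      exact this
    simp only [PySem.Str.startswith_eq, PySem.Chars.startswith_iff]
    exact h1.trans h2
  unfold pvCont
  rw [hpre]
  simp

theorem pvCont_not_hdr {s : String} (h : pvCont s = true) : pvHdr s = false := by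
  by_contra hh
  have := pvHdr_not_cont (s := s) (by revert hh; cases pvHdr s <;> simp)
  simp [this] at h

-- A's inner while = takeWhile/dropWhile on the cleaned tail
theorem pvInnerA_clean (ls : List String) :
    (pvInnerA ls).1 = ((pvClean ls).takeWhile pvCont).map pvContC ∧
    pvClean (pvInnerA ls).2 = (pvClean ls).dropWhile pvCont := by
  induction ls with
  | nil => simp [pvInnerA, pvClean]
  | cons l ls ih =>
    obtain ⟨ih1, ih2⟩ := ih
    by_cases hb : PySem.Str.strip l = ""
    · have hcl : pvClean (l :: ls) = pvClean ls := by
        simp [pvClean, hb]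
      have hA : pvInnerA (l :: ls) = pvInnerA ls := by
        rw [pvInnerA]; simp [hb]
      rw [hA, hcl]; exact ⟨ih1, ih2⟩
    · have hcl : pvClean (l :: ls) = PySem.Str.strip l :: pvClean ls := by
        simp [pvClean, hb]
      by_cases hc : pvCont (PySem.Str.strip l) = true
      · have hcp : (PySem.Str.startswith (PySem.Str.strip l) "|" &&
            !(PySem.Str.startswith (PySem.Str.strip l) "///")) = true := hc
        have hA : pvInnerA (l :: ls) =
            (pvContC (PySem.Str.strip l) :: (pvInnerA ls).1, (pvInnerA ls).2) := by
          rw [pvInnerA]; simp only [if_neg hb, hcp, if_true, pvContC]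
        rw [hA, hcl, List.takeWhile_cons_of_pos hc, List.dropWhile_cons_of_pos hc]
        exact ⟨by simp [ih1], ih2⟩
      · have hcp : (PySem.Str.startswith (PySem.Str.strip l) "|" &&
            !(PySem.Str.startswith (PySem.Str.strip l) "///")) = false := by
          revert hc; unfold pvCont; cases h : (PySem.Str.startswith (PySem.Str.strip l) "|" &&
            !(PySem.Str.startswith (PySem.Str.strip l) "///")) <;> simp
        have hA : pvInnerA (l :: ls) = ([], l :: ls) := by
          rw [pvInnerA]; simp only [if_neg hb, hcp, Bool.false_eq_true, if_false]
        have hcf : pvCont (PySem.Str.strip l) = false := by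
          revert hc; cases pvCont (PySem.Str.strip l) <;> simp
        rw [hA, hcl, List.takeWhile_cons_of_neg (by simp [hcf]),
          List.dropWhile_cons_of_neg (by simp [hcf])]
        exact ⟨rfl, rfl⟩

-- A computes pvSpec of the cleaned lines
theorem pvOuterA_eq_spec (ls : List String) : pvOuterA ls = pvSpec (pvClean ls) := by
  induction ls using pvOuterA.induct with
  | case1 => simp [pvOuterA, pvClean, pvSpec]
  | case2 l ls stripped hh r ih =>
    have hh' : PySem.Str.startswith (PySem.Str.strip l) "///SCENE_STAGING:" = true := hh
    have hb : PySem.Str.strip l ≠ "" := by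
      intro h; rw [h] at hh'; revert hh'; decide
    have hcl : pvClean (l :: ls) = PySem.Str.strip l :: pvClean ls := by
      simp [pvClean, hb]
    have hA : pvOuterA (l :: ls) =
        PySem.Str.join " | " (pvHdrC (PySem.Str.strip l) :: (pvInnerA ls).1) ::
          pvOuterA (pvInnerA ls).2 := by
      rw [pvOuterA]; simp only [hh', if_true, pvHdrC]
    have hin := pvInnerA_clean ls
    rw [hA, hcl, pvSpec, if_pos (show pvHdr (PySem.Str.strip l) = true from hh'),
      ← hin.1, ← hin.2]
    have ih' : pvOuterA (pvInnerA ls).2 = pvSpec (pvClean (pvInnerA ls).2) := ih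
    rw [ih']
  | case3 l ls stripped hh ih =>
    have hh' : ¬ PySem.Str.startswith (PySem.Str.strip l) "///SCENE_STAGING:" = true := hh
    have hA : pvOuterA (l :: ls) = pvOuterA ls := by
      rw [pvOuterA]; simp only [if_neg hh']
    rw [hA, ih]
    by_cases hb : PySem.Str.strip l = ""
    · have : pvClean (l :: ls) = pvClean ls := by simp [pvClean, hb]
      rw [this]
    · have hcl : pvClean (l :: ls) = PySem.Str.strip l :: pvClean ls := by
        simp [pvClean, hb]
      have hhf : pvHdr (PySem.Str.strip l) = false := by
        revert hh'; unfold pvHdr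
        cases PySem.Str.startswith (PySem.Str.strip l) "///SCENE_STAGING:" <;> simp
      rw [hcl, pvSpec, if_neg (by simp [hhf])]

-- pvSpec ignores leading continuation lines
theorem pvSpec_dropWhile (ls : List String) : pvSpec (ls.dropWhile pvCont) = pvSpec ls := by
  induction ls with
  | nil => simp
  | cons s ls ih =>
    by_cases hc : pvCont s = true
    · rw [List.dropWhile_cons_of_pos hc, ih, pvSpec, if_neg (by simp [pvCont_not_hdr hc])]
    · rw [List.dropWhile_cons_of_neg (by simp_all)]

-- B's right-to-left pass, seen as a foldr, computes pvSpec back-to-front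
theorem pvFoldrB (ls : List String) :
    ls.foldr (fun s st => pvStepB st s) ([], []) =
      ((pvSpec ls).reverse, ((ls.takeWhile pvCont).map pvContC).reverse) := by
  induction ls with
  | nil => simp [pvSpec]
  | cons s ls ih =>
    rw [List.foldr_cons, ih]
    show pvStepB _ s = _
    unfold pvStepB
    by_cases hc : pvCont s = true
    · have hcp : (PySem.Str.startswith s "|" && !(PySem.Str.startswith s "///")) = true := hc
      rw [if_pos hcp, List.takeWhile_cons_of_pos hc, pvSpec,
        if_neg (by simp [pvCont_not_hdr hc])]
      simp [pvContC]
    · have hcf : pvCont s = false := by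
        revert hc; cases pvCont s <;> simp
      have hcp : (PySem.Str.startswith s "|" && !(PySem.Str.startswith s "///")) = false := hcf
      rw [if_neg (show ¬ _ from by rw [hcp]; simp), List.takeWhile_cons_of_neg (by simp [hcf])]
      by_cases hh : pvHdr s = true
      · rw [if_pos (show PySem.Str.startswith s "///SCENE_STAGING:" = true from hh),
          pvSpec, if_pos hh]
        simp [pvHdrC, pvSpec_dropWhile]
      · have hhf : pvHdr s = false := by
          revert hh; cases pvHdr s <;> simp
        rw [if_neg (by simpa [pvHdr] using hh), pvSpec, if_neg (by simp [hhf])]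
        simp

-- B computes pvSpec of the cleaned lines
theorem pvAlt_eq_spec (text : String) :
    extract_staging_blocks_py_alt text = pvSpec (pvClean (PySem.Str.splitlines text)) := by
  unfold extract_staging_blocks_py_alt
  simp only [List.foldl_reverse, pvFoldrB, List.reverse_reverse]
  simp [pvClean]

-- ===== VERDICT =====
theorem extract_staging_blocks_py_spec : Claim_equal_extract_staging_blocks_py := by
  intro text _
  unfold Spec_extract_staging_blocks_py extract_staging_blocks_py
  rw [pvAlt_eq_spec, pvOuterA_eq_spec]
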